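-- pv_equiv track=rewrite | github.com/Thanhson89/FPRTest | fptnn/multlay.py | layerstring
-- ===== SOURCE A (Python) =====
-- def layerstring(l,r,n):
--     if l==0:
--         s="sin("
--         for x in range(n[0]):
--             s=s+"w"+str(l)+str(x)+str(r)+"*x"+str(x)
--             if x<n[0]-1:
--                 s=s+"+"
--             else:
--                 s=s+")"
--     else:
--         s="max(0,"
--         for x in range(n[l]):
--             s=s+"w"+str(l)+str(x)+str(r)+"*"+layerstring(l-1,r,n)
--             if x<n[l]-1:
--                 s=s+"+"
--             else:
--                 s=s+")"
--     return s
-- ===== SOURCE B (Python) =====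
-- def layerstring(l, r, n):
--     memo = {}
--     def build(layer):
--         if layer not in memo:
--             if layer == 0:
--                 memo[0] = "sin(" + "".join(
--                     "w0" + str(x) + str(r) + "*x" + str(x)
--                     + ("+" if x < n[0] - 1 else ")")
--                     for x in range(n[0]))
--             else:
--                 memo[layer] = "max(0," + "".join(
--                     "w" + str(layer) + str(x) + str(r) + "*" + build(layer - 1)
--                     + ("+" if x < n[layer] - 1 else ")")
--                     for x in range(n[layer]))
--         return memo[layer]
--     return build(l)
-- ===== Notes on version B (the rewrite author's own statement) =====
-- stated objective: alternative
-- what changed: Replaces A's naive recursion, which recomputes the whole lower-layer formula for every term of every layer, with a memoised recursion (a dict cache) so each layer's string is constructed once and reused; Pre_ excludes l >= len(n), where A raises IndexError, and l < 0, where A either recurses forever (RecursionError) or only returns by the accident of negative-index wraparound hitting a non-positive width (B follows the same wraparound there and returns the same value).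
-- outside the precondition, e.g. on layerstring(-1, -1, [0, 1]): A returns 'max(0,w-10-1*max(0,)', B returns 'max(0,w-10-1*max(0,)'
import Mathlib
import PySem

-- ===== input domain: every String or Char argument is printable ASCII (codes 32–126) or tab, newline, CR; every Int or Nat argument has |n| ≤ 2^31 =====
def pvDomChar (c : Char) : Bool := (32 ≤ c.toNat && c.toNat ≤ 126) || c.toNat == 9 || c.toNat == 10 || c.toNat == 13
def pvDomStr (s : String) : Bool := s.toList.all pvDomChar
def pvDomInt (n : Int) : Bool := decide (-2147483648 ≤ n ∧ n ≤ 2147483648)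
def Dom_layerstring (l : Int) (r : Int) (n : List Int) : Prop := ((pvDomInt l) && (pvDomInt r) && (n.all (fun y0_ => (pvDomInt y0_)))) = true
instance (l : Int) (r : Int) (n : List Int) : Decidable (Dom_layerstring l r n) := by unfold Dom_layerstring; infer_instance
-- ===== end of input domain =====

-- B replaces A's per-term re-recursion with a bottom-up loop that builds each
-- layer's string once and threads it forward (return value proved equal on Pre_).

-- ===== PORT A =====
-- A's recursion on l, run on l.toNat (Pre_ requires 0 ≤ l: Python recurses into
-- negative l otherwise). n[l] is pyGetD (Pre_ requires l < n.length: IndexError).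
-- Strings are built on List Char (PySem.Chars side) and packed with String.mk at the end.
def pvAgo : Nat → Int → List Int → List Char
  | 0, r, n =>
    let cnt := PySem.List.pyGetD n (0 : Int) 0
    (PySem.List.pyRange 0 cnt 1).foldl (fun s x =>
      let s := s ++ "w".toList ++ PySem.Int.toChars 0 ++ PySem.Int.toChars x
                 ++ PySem.Int.toChars r ++ "*x".toList ++ PySem.Int.toChars x
      if x < cnt - 1 then s ++ "+".toList else s ++ ")".toList) "sin(".toList
  | (k+1), r, n =>
    let l : Int := (k : Int) + 1
    let cnt := PySem.List.pyGetD n l 0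
    (PySem.List.pyRange 0 cnt 1).foldl (fun s x =>
      let s := s ++ "w".toList ++ PySem.Int.toChars l ++ PySem.Int.toChars x
                 ++ PySem.Int.toChars r ++ "*".toList ++ pvAgo k r n
      if x < cnt - 1 then s ++ "+".toList else s ++ ")".toList) "max(0,".toList

def layerstring (l : Int) (r : Int) (n : List Int) : String :=
  String.mk (pvAgo l.toNat r n)

-- ===== PORT B =====
-- B: the same recursion memoised in a dict (build returns the string and the updated memo;
-- the "".join over the generator is the state-threading fold, exact step for step).
def pvBuild : Nat → Int → List Int → PySem.Dict Int (List Char) → (List Char × PySem.Dict Int (List Char))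
  | 0, r, n, memo =>
    match PySem.Dict.get? memo (0 : Int) with
    | some v => (v, memo)
    | none =>
      let cnt := PySem.List.pyGetD n (0 : Int) 0
      let s := "sin(".toList ++ ((PySem.List.pyRange 0 cnt 1).map (fun x =>
        "w0".toList ++ PySem.Int.toChars x ++ PySem.Int.toChars r
          ++ "*x".toList ++ PySem.Int.toChars x
          ++ (if x < cnt - 1 then "+".toList else ")".toList))).flatten
      (s, PySem.Dict.insert memo (0 : Int) s)
  | (k+1), r, n, memo =>
    let layer : Int := (k : Int) + 1
    match PySem.Dict.get? memo layer with
    | some v => (v, memo)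
    | none =>
      let cnt := PySem.List.pyGetD n layer 0
      let p := (PySem.List.pyRange 0 cnt 1).foldl
        (fun (p : List Char × PySem.Dict Int (List Char)) x =>
          let q := pvBuild k r n p.2
          (p.1 ++ "w".toList ++ PySem.Int.toChars layer ++ PySem.Int.toChars x
             ++ PySem.Int.toChars r ++ "*".toList ++ q.1
             ++ (if x < cnt - 1 then "+".toList else ")".toList), q.2))
        ("max(0,".toList, memo)
      (p.1, PySem.Dict.insert p.2 layer p.1)

def layerstring_alt (l : Int) (r : Int) (n : List Int) : String :=
  String.mk (pvBuild l.toNat r n PySem.Dict.empty).1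

-- ===== PRECONDITION & SPEC =====
-- Pre_ excludes l ≥ len(n), where A raises IndexError, and l < 0, where A either
-- recurses forever (RecursionError) or returns a value only by the accident of
-- negative-index wraparound meeting a non-positive width before the indices run out.
def Pre_layerstring (l : Int) (_r : Int) (n : List Int) : Prop := 0 ≤ l ∧ l < n.length
instance (l : Int) (r : Int) (n : List Int) : Decidable (Pre_layerstring l r n) := by
  unfold Pre_layerstring; infer_instance

def pvWitness_layerstring : Int × Int × List Int := (1, 2, [2, 2])

def Spec_layerstring (l : Int) (r : Int) (n : List Int) (out : String) : Prop := out = layerstring_alt l r n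
instance (l : Int) (r : Int) (n : List Int) (out : String) : Decidable (Spec_layerstring l r n out) := by unfold Spec_layerstring; infer_instance

-- ===== CLAIM (what is proved, stated in full; the proofs are below) =====
def Claim_equal_layerstring : Prop := ∀ (l : Int) (r : Int) (n : List Int), Dom_layerstring l r n → Pre_layerstring l r n → Spec_layerstring l r n (layerstring l r n)

-- ===== LEMMAS AND PROOFS =====

-- A's accumulator loop in flatMap form: each iteration appends term ++ separator.
lemma pvLoop_eq (cnt : Int) (f : Int → List Char) (pre : List Char) :
    (PySem.List.pyRange 0 cnt 1).foldl (fun s x =>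
        if x < cnt - 1 then (s ++ f x) ++ "+".toList else (s ++ f x) ++ ")".toList) pre
      = pre ++ (PySem.List.pyRange 0 cnt 1).flatMap
          (fun x => f x ++ (if x < cnt - 1 then "+".toList else ")".toList)) := by
  rw [PySem.List.foldl_congr_mem (PySem.List.pyRange 0 cnt 1) _
      (fun s x => s ++ (f x ++ (if x < cnt - 1 then "+".toList else ")".toList))) pre
      (by intro acc x _; split_ifs <;> simp [List.append_assoc] <;> omega)]
  exact PySem.List.foldl_append_eq_flatMap _ _ _

lemma pvW0 : ("w0".toList : List Char) = "w".toList ++ PySem.Int.toChars 0 := by decide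

-- A's two bodies in that closed form.
lemma pvAgo_zero (r : Int) (n : List Int) :
    pvAgo 0 r n = "sin(".toList ++ (PySem.List.pyRange 0 (PySem.List.pyGetD n (0 : Int) 0) 1).flatMap
      (fun x => "w".toList ++ PySem.Int.toChars 0 ++ PySem.Int.toChars x
        ++ PySem.Int.toChars r ++ "*x".toList ++ PySem.Int.toChars x
        ++ (if x < PySem.List.pyGetD n (0 : Int) 0 - 1 then "+".toList else ")".toList)) := by
  show (PySem.List.pyRange 0 (PySem.List.pyGetD n (0 : Int) 0) 1).foldl _ _ = _
  rw [← pvLoop_eq]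
  exact PySem.List.foldl_congr_mem _ _ _ _
    (by intro acc x _; split_ifs <;> simp [List.append_assoc])

lemma pvAgo_succ (k : Nat) (r : Int) (n : List Int) :
    pvAgo (k + 1) r n = "max(0,".toList ++ (PySem.List.pyRange 0 (PySem.List.pyGetD n ((k : Int) + 1) 0) 1).flatMap
      (fun x => "w".toList ++ PySem.Int.toChars ((k : Int) + 1) ++ PySem.Int.toChars x
        ++ PySem.Int.toChars r ++ "*".toList ++ pvAgo k r n
        ++ (if x < PySem.List.pyGetD n ((k : Int) + 1) 0 - 1 then "+".toList else ")".toList)) := by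
  show (PySem.List.pyRange 0 (PySem.List.pyGetD n ((k : Int) + 1) 0) 1).foldl _ _ = _
  rw [← pvLoop_eq]
  exact PySem.List.foldl_congr_mem _ _ _ _
    (by intro acc x _; split_ifs <;> simp [List.append_assoc])

-- the memo only ever holds the recursion's own values
def pvInv (r : Int) (n : List Int) (memo : PySem.Dict Int (List Char)) : Prop :=
  ∀ (j : Nat) (v : List Char), PySem.Dict.get? memo (j : Int) = some v → v = pvAgo j r n

-- the state-threading fold of pvBuild's recursive case (proof abbreviation)
def pvF (k : Nat) (r : Int) (n : List Int) (memo : PySem.Dict Int (List Char)) :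
    List Char × PySem.Dict Int (List Char) :=
  (PySem.List.pyRange 0 (PySem.List.pyGetD n ((k : Int) + 1) 0) 1).foldl
    (fun (p : List Char × PySem.Dict Int (List Char)) x =>
      let q := pvBuild k r n p.2
      (p.1 ++ "w".toList ++ PySem.Int.toChars ((k : Int) + 1) ++ PySem.Int.toChars x
         ++ PySem.Int.toChars r ++ "*".toList ++ q.1
         ++ (if x < PySem.List.pyGetD n ((k : Int) + 1) 0 - 1 then "+".toList else ")".toList), q.2))
    ("max(0,".toList, memo)

lemma pvBuild_zero_of_some (r : Int) (n : List Int) (memo : PySem.Dict Int (List Char))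
    (v : List Char) (h : PySem.Dict.get? memo (0 : Int) = some v) :
    pvBuild 0 r n memo = (v, memo) := by
  rw [pvBuild, h]

lemma pvBuild_zero_of_none (r : Int) (n : List Int) (memo : PySem.Dict Int (List Char))
    (h : PySem.Dict.get? memo (0 : Int) = none) :
    pvBuild 0 r n memo =
      ("sin(".toList ++ ((PySem.List.pyRange 0 (PySem.List.pyGetD n (0 : Int) 0) 1).map (fun x =>
        "w0".toList ++ PySem.Int.toChars x ++ PySem.Int.toChars r
          ++ "*x".toList ++ PySem.Int.toChars x
          ++ (if x < PySem.List.pyGetD n (0 : Int) 0 - 1 then "+".toList else ")".toList))).flatten,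
       PySem.Dict.insert memo (0 : Int)
        ("sin(".toList ++ ((PySem.List.pyRange 0 (PySem.List.pyGetD n (0 : Int) 0) 1).map (fun x =>
          "w0".toList ++ PySem.Int.toChars x ++ PySem.Int.toChars r
            ++ "*x".toList ++ PySem.Int.toChars x
            ++ (if x < PySem.List.pyGetD n (0 : Int) 0 - 1 then "+".toList else ")".toList))).flatten)) := by
  rw [pvBuild, h]

lemma pvBuild_succ_of_some (k : Nat) (r : Int) (n : List Int) (memo : PySem.Dict Int (List Char))
    (v : List Char) (h : PySem.Dict.get? memo ((k : Int) + 1) = some v) :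
    pvBuild (k + 1) r n memo = (v, memo) := by
  rw [pvBuild, h]

lemma pvBuild_succ_of_none (k : Nat) (r : Int) (n : List Int) (memo : PySem.Dict Int (List Char))
    (h : PySem.Dict.get? memo ((k : Int) + 1) = none) :
    pvBuild (k + 1) r n memo =
      ((pvF k r n memo).1, PySem.Dict.insert (pvF k r n memo).2 ((k : Int) + 1) (pvF k r n memo).1) := by
  rw [pvBuild, h]
  rfl

lemma pvBuild_zero_closed (r : Int) (n : List Int) :
    ("sin(".toList ++ ((PySem.List.pyRange 0 (PySem.List.pyGetD n (0 : Int) 0) 1).map (fun x =>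
      "w0".toList ++ PySem.Int.toChars x ++ PySem.Int.toChars r
        ++ "*x".toList ++ PySem.Int.toChars x
        ++ (if x < PySem.List.pyGetD n (0 : Int) 0 - 1 then "+".toList else ")".toList))).flatten
      : List Char) = pvAgo 0 r n := by
  rw [pvAgo_zero]
  simp [pvW0, List.flatten_eq_flatMap, List.flatMap_map, List.append_assoc]

lemma pvInv_insert (r : Int) (n : List Int) (memo : PySem.Dict Int (List Char)) (m : Nat)
    (hm : pvInv r n memo) :
    pvInv r n (PySem.Dict.insert memo (m : Int) (pvAgo m r n)) := by
  intro j v hj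
  rw [PySem.Dict.get?_insert] at hj
  split_ifs at hj with hje
  · cases hj
    have : j = m := by exact_mod_cast hje
    rw [this]
  · exact hm j v hj

-- memoised build = A's recursion (value), and the memo invariant is preserved
lemma pvBuild_eq (r : Int) (n : List Int) : ∀ (k : Nat) (memo : PySem.Dict Int (List Char)),
    pvInv r n memo →
    (pvBuild k r n memo).1 = pvAgo k r n ∧ pvInv r n (pvBuild k r n memo).2 := by
  intro k
  induction k with
  | zero =>
    intro memo hm
    cases h : PySem.Dict.get? memo (0 : Int) with
    | some v =>
      rw [pvBuild_zero_of_some r n memo v h]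
      exact ⟨hm 0 v (by exact_mod_cast h), hm⟩
    | none =>
      rw [pvBuild_zero_of_none r n memo h]
      refine ⟨pvBuild_zero_closed r n, ?_⟩
      rw [pvBuild_zero_closed r n]
      have hins := pvInv_insert r n memo 0 hm
      simpa using hins
  | succ k ih =>
    intro memo hm
    cases h : PySem.Dict.get? memo ((k : Int) + 1) with
    | some v =>
      rw [pvBuild_succ_of_some k r n memo v h]
      exact ⟨hm (k + 1) v (by push_cast; exact_mod_cast h), hm⟩
    | none =>
      rw [pvBuild_succ_of_none k r n memo h]
      have hfold : ∀ (xs : List Int) (acc : List Char) (m : PySem.Dict Int (List Char)),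
          pvInv r n m →
          (xs.foldl (fun (p : List Char × PySem.Dict Int (List Char)) x =>
              let q := pvBuild k r n p.2
              (p.1 ++ "w".toList ++ PySem.Int.toChars ((k : Int) + 1) ++ PySem.Int.toChars x
                 ++ PySem.Int.toChars r ++ "*".toList ++ q.1
                 ++ (if x < PySem.List.pyGetD n ((k : Int) + 1) 0 - 1 then "+".toList else ")".toList), q.2))
            (acc, m)).1
            = xs.foldl (fun a x =>
                a ++ "w".toList ++ PySem.Int.toChars ((k : Int) + 1) ++ PySem.Int.toChars x
                 ++ PySem.Int.toChars r ++ "*".toList ++ pvAgo k r n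
                 ++ (if x < PySem.List.pyGetD n ((k : Int) + 1) 0 - 1 then "+".toList else ")".toList)) acc
          ∧ pvInv r n (xs.foldl (fun (p : List Char × PySem.Dict Int (List Char)) x =>
              let q := pvBuild k r n p.2
              (p.1 ++ "w".toList ++ PySem.Int.toChars ((k : Int) + 1) ++ PySem.Int.toChars x
                 ++ PySem.Int.toChars r ++ "*".toList ++ q.1
                 ++ (if x < PySem.List.pyGetD n ((k : Int) + 1) 0 - 1 then "+".toList else ")".toList), q.2))
            (acc, m)).2 := by
        intro xs
        induction xs with
        | nil => intro acc m hmq; exact ⟨rfl, hmq⟩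
        | cons x xs ihx =>
          intro acc m hmq
          obtain ⟨hq1, hq2⟩ := ih m hmq
          simp only [List.foldl_cons, hq1]
          exact ihx _ _ hq2
      have hval : (PySem.List.pyRange 0 (PySem.List.pyGetD n ((k : Int) + 1) 0) 1).foldl
          (fun a x =>
            a ++ "w".toList ++ PySem.Int.toChars ((k : Int) + 1) ++ PySem.Int.toChars x
             ++ PySem.Int.toChars r ++ "*".toList ++ pvAgo k r n
             ++ (if x < PySem.List.pyGetD n ((k : Int) + 1) 0 - 1 then "+".toList else ")".toList))
          "max(0,".toList = pvAgo (k + 1) r n := by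
        rw [PySem.List.foldl_congr_mem _ _
            (fun (a : List Char) x => a ++ ("w".toList ++ PySem.Int.toChars ((k : Int) + 1)
              ++ PySem.Int.toChars x ++ PySem.Int.toChars r ++ "*".toList ++ pvAgo k r n
              ++ (if x < PySem.List.pyGetD n ((k : Int) + 1) 0 - 1 then "+".toList else ")".toList)))
            "max(0,".toList (by intro acc x _; simp [List.append_assoc]),
          PySem.List.foldl_append_eq_flatMap, pvAgo_succ]
      obtain ⟨h1, h2⟩ := hfold (PySem.List.pyRange 0 (PySem.List.pyGetD n ((k : Int) + 1) 0) 1)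
        "max(0,".toList memo hm
      have hF1 : (pvF k r n memo).1 = pvAgo (k + 1) r n := by
        unfold pvF; rw [h1, hval]
      have hF2 : pvInv r n (pvF k r n memo).2 := h2
      refine ⟨hF1, ?_⟩
      rw [hF1]
      have hins := pvInv_insert r n (pvF k r n memo).2 (k + 1) hF2
      push_cast at hins
      exact hins

-- ===== VERDICT =====
theorem layerstring_spec : Claim_equal_layerstring := by
  intro l r n _ hpre
  have hl : ((l.toNat : Nat) : Int) = l := Int.toNat_of_nonneg hpre.1
  show layerstring l r n = layerstring_alt l r n
  have hinv : pvInv r n (PySem.Dict.empty : PySem.Dict Int (List Char)) := by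
    intro j v hj
    simp [PySem.Dict.get?_empty] at hj
  have h := (pvBuild_eq r n l.toNat PySem.Dict.empty hinv).1
  simp only [layerstring, layerstring_alt, h]
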